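-- pv_equiv track=rewrite | github.com/hero526/redscope | utils/static_pd/src/printer.py | get_syscall_sum
-- ===== SOURCE A (Python) =====
-- def get_syscall_sum(usages, eid, retval, metric_list):
--     sum_per_metric = dict()
--     count = 0
--     for metric in metric_list:
--         if "RDCAS" in metric:
--             sum_per_metric["RDCAS"] = 0
--         elif "WRCAS" in metric:
--             sum_per_metric["WRCAS"] = 0
--         sum_per_metric[metric] = 0
--
--     for usage in usages:
--         for evt in usage:
--             if evt["eventId"] == eid and evt["returnValue"] == retval:
--                 count += 1
--                 for metric in metric_list:
--                     sum_per_metric[metric] += evt[metric]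
--
--     for metric in sum_per_metric:
--         if "RDCAS" in metric:
--             sum_per_metric["RDCAS"] += sum_per_metric[metric]
--         elif "WRCAS" in metric:
--             sum_per_metric["WRCAS"] += sum_per_metric[metric]
--
--     for cas in ["RDCAS_0_0","WRCAS_0_0","RDCAS_0_1","WRCAS_0_1","RDCAS_1_0","WRCAS_1_0","RDCAS_1_1","WRCAS_1_1"]:
--         sum_per_metric.pop(cas, None)
--
--     return sum_per_metric, count
-- ===== SOURCE B (Python) =====
-- def get_syscall_sum(usages, eid, retval, metric_list):
--     # flatten + filter once, then one direct sum per metric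
--     matched = [evt for usage in usages for evt in usage
--                if evt["eventId"] == eid and evt["returnValue"] == retval]
--
--     sums = dict()
--     for metric in metric_list:
--         if "RDCAS" in metric:
--             sums.setdefault("RDCAS", 0)
--         elif "WRCAS" in metric:
--             sums.setdefault("WRCAS", 0)
--         sums[metric] = sum(evt[metric] for evt in matched)
--
--     for key in list(sums):
--         if "RDCAS" in key:
--             sums["RDCAS"] += sums[key]
--         elif "WRCAS" in key:
--             sums["WRCAS"] += sums[key]
--
--     for cas in ["RDCAS_0_0","WRCAS_0_0","RDCAS_0_1","WRCAS_0_1","RDCAS_1_0","WRCAS_1_0","RDCAS_1_1","WRCAS_1_1"]: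
--         sums.pop(cas, None)
--
--     return sums, len(matched)
-- ===== Notes on version B (the rewrite author's own statement) =====
-- stated objective: simpler
-- what changed: B replaces A's triple-nested per-event accumulation into a mutated dict by one flatten+filter pass that materialises the matched events, then sums each metric directly over them; Pre_ excludes inputs where A raises KeyError and metric lists with duplicate entries when some event matches, a corner where A's per-occurrence accumulation and B's per-metric sum are both defensible readings of a repeated metric.
import Mathlib
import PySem

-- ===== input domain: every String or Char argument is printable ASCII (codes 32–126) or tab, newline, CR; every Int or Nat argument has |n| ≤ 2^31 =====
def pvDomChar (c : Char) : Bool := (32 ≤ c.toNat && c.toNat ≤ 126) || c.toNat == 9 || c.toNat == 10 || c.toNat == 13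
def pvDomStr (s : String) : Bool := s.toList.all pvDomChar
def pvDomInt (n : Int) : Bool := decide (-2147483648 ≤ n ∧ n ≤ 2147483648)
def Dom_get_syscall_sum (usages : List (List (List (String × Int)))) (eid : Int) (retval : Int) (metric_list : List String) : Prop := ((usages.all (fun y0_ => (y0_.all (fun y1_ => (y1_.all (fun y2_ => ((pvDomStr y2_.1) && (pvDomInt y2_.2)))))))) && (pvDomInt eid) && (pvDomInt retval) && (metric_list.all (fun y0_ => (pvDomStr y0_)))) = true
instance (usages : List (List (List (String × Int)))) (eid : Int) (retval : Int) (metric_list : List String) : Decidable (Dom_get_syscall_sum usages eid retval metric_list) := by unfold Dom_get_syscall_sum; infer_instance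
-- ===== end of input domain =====

-- B flattens and filters the events once and sums each metric directly over the matched events
-- instead of A's per-event dict accumulation; objective: simpler.


-- ===== PORT A =====
-- shared vocabulary of both ports (the Python sources share these fragments verbatim):
-- the match test 'evt["eventId"] == eid and evt["returnValue"] == retval'
def pvMatch (eid : Int) (retval : Int) (evt : List (String × Int)) : Bool :=
  ((PySem.Dict.ofList evt).getD "eventId" 0 == eid) && ((PySem.Dict.ofList evt).getD "returnValue" 0 == retval)

-- the CAS regroup loop 'for metric in sum_per_metric: …' (the key list is fixed, values mutate;
-- sum_per_metric["RDCAS"]/"WRCAS" is provably present whenever the branch fires, so getD is exact)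
def pvCasFix (d : PySem.Dict String Int) : PySem.Dict String Int :=
  d.keys.foldl (fun d k =>
    if PySem.Str.isIn "RDCAS" k then d.insert "RDCAS" (d.getD "RDCAS" 0 + d.getD k 0)
    else if PySem.Str.isIn "WRCAS" k then d.insert "WRCAS" (d.getD "WRCAS" 0 + d.getD k 0)
    else d) d

-- the final 'for cas in [...]: sum_per_metric.pop(cas, None)' loop
def pvPopCas (d : PySem.Dict String Int) : PySem.Dict String Int :=
  (["RDCAS_0_0","WRCAS_0_0","RDCAS_0_1","WRCAS_0_1","RDCAS_1_0","WRCAS_1_0","RDCAS_1_1","WRCAS_1_1"] : List String).foldl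
    (fun d cas => d.erase cas) d

-- A's first loop body (zero-initialisation, aggregate key inserted before the metric)
def pvInitStep (d : PySem.Dict String Int) (metric : String) : PySem.Dict String Int :=
  (if PySem.Str.isIn "RDCAS" metric then d.insert "RDCAS" 0
   else if PySem.Str.isIn "WRCAS" metric then d.insert "WRCAS" 0
   else d).insert metric 0

-- A's inner accumulation loop 'for metric in metric_list: sum_per_metric[metric] += evt[metric]'
-- (evt[metric] is in-range under Pre_, so getD is exact there)
def pvAddEvt (metric_list : List String) (evt : List (String × Int)) (d : PySem.Dict String Int) :
    PySem.Dict String Int :=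
  metric_list.foldl (fun d metric => d.insert metric (d.getD metric 0 + (PySem.Dict.ofList evt).getD metric 0)) d

def get_syscall_sum (usages : List (List (List (String × Int)))) (eid : Int) (retval : Int) (metric_list : List String) : (List (String × Int)) × Int :=
  let st :=
    usages.foldl (fun st usage =>
      usage.foldl (fun st evt =>
        if pvMatch eid retval evt then (pvAddEvt metric_list evt st.1, st.2 + 1) else st) st)
      (metric_list.foldl pvInitStep PySem.Dict.empty, (0 : Int))
  ((pvPopCas (pvCasFix st.1)).items, st.2)

-- ===== PORT B =====
-- B's total for one metric: sum(evt[metric] for evt in matched)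
def pvTot (matched : List (List (String × Int))) (metric : String) : Int :=
  (matched.map (fun evt => (PySem.Dict.ofList evt).getD metric 0)).sum

-- B's loop body: setdefault for the aggregate key, then the direct sum
def pvBuildStep (matched : List (List (String × Int)))
    (d : PySem.Dict String Int) (metric : String) : PySem.Dict String Int :=
  (if PySem.Str.isIn "RDCAS" metric then d.setdefault "RDCAS" 0
   else if PySem.Str.isIn "WRCAS" metric then d.setdefault "WRCAS" 0
   else d).insert metric (pvTot matched metric)

def get_syscall_sum_alt (usages : List (List (List (String × Int)))) (eid : Int) (retval : Int) (metric_list : List String) : (List (String × Int)) × Int :=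
  let matched := (usages.flatMap (fun usage => usage)).filter (pvMatch eid retval)
  let sums := metric_list.foldl (pvBuildStep matched) PySem.Dict.empty
  ((pvPopCas (pvCasFix sums)).items, (matched.length : Int))

-- ===== PRECONDITION & SPEC =====
-- Pre_ excludes (a) the inputs where Python A raises KeyError (an event without "eventId", a
-- matching-eventId event without "returnValue", or a fully matching event lacking some metric),
-- and (b) metric lists with duplicate entries when some event matches (eid, retval), a corner
-- where A's per-occurrence accumulation counts a repeated metric's events once per occurrence
-- while B's per-metric sum counts them once — both defensible readings of a repeated metric.
def Pre_get_syscall_sum (usages : List (List (List (String × Int)))) (eid : Int) (retval : Int) (metric_list : List String) : Prop :=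
  (metric_list.Nodup ∨ ∀ usage ∈ usages, ∀ evt ∈ usage, pvMatch eid retval evt = false) ∧
  ∀ usage ∈ usages, ∀ evt ∈ usage,
    (PySem.Dict.ofList evt).contains "eventId" = true ∧
    ((PySem.Dict.ofList evt).get? "eventId" = some eid →
      (PySem.Dict.ofList evt).contains "returnValue" = true ∧
      ((PySem.Dict.ofList evt).get? "returnValue" = some retval →
        ∀ m ∈ metric_list, (PySem.Dict.ofList evt).contains m = true))
instance (usages : List (List (List (String × Int)))) (eid : Int) (retval : Int) (metric_list : List String) : Decidable (Pre_get_syscall_sum usages eid retval metric_list) := by unfold Pre_get_syscall_sum; infer_instance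

def pvWitness_get_syscall_sum : (List (List (List (String × Int)))) × Int × Int × List String :=
  ([[[("eventId", 1), ("returnValue", 0), ("RDCAS_0_0", 3), ("m", 2)],
     [("eventId", 2), ("returnValue", 0)]]], 1, 0, ["RDCAS_0_0", "m"])

def Spec_get_syscall_sum (usages : List (List (List (String × Int)))) (eid : Int) (retval : Int) (metric_list : List String) (out : (List (String × Int)) × Int) : Prop := out = get_syscall_sum_alt usages eid retval metric_list
instance (usages : List (List (List (String × Int)))) (eid : Int) (retval : Int) (metric_list : List String) (out : (List (String × Int)) × Int) : Decidable (Spec_get_syscall_sum usages eid retval metric_list out) := by unfold Spec_get_syscall_sum; infer_instance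

-- ===== CLAIM (what is proved, stated in full; the proofs are below) =====
def Claim_equal_get_syscall_sum : Prop := ∀ (usages : List (List (List (String × Int)))) (eid : Int) (retval : Int) (metric_list : List String), Dom_get_syscall_sum usages eid retval metric_list → Pre_get_syscall_sum usages eid retval metric_list → Spec_get_syscall_sum usages eid retval metric_list (get_syscall_sum usages eid retval metric_list)

-- ===== LEMMAS AND PROOFS =====

theorem pv_scan_eq (usages : List (List (List (String × Int)))) (eid retval : Int)
    (ml : List String) (d0 : PySem.Dict String Int) (c0 : Int) :
    usages.foldl (fun st usage =>
      usage.foldl (fun st evt =>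
        if pvMatch eid retval evt then (pvAddEvt ml evt st.1, st.2 + 1) else st) st) (d0, c0)
    = (((usages.flatMap (fun u => u)).filter (pvMatch eid retval)).foldl
         (fun d evt => pvAddEvt ml evt d) d0,
       c0 + ((usages.flatMap (fun u => u)).filter (pvMatch eid retval)).length) := by
  rw [← List.foldl_flatMap]
  have hg : (fun (st : PySem.Dict String Int × Int) evt =>
      if pvMatch eid retval evt then (pvAddEvt ml evt st.1, st.2 + 1) else st)
    = (fun st evt => ((fun d e => if pvMatch eid retval e then pvAddEvt ml e d else d) st.1 evt,
                      (fun c e => if pvMatch eid retval e then c + 1 else c) st.2 evt)) := by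
    funext st evt; by_cases h : pvMatch eid retval evt <;> simp [h]
  rw [hg, PySem.List.foldl_prod_mk (fun d e => if pvMatch eid retval e = true then pvAddEvt ml e d else d) (fun c e => if pvMatch eid retval e = true then c + 1 else c)]
  refine Prod.ext ?_ ?_
  · simpa using (List.foldl_filter (p := pvMatch eid retval)
      (f := fun d e => pvAddEvt ml e d) (l := usages.flatMap (fun u => u)) (init := d0)).symm
  · simpa [List.countP_eq_length_filter] using
      PySem.List.foldl_count_if (pvMatch eid retval) (usages.flatMap (fun u => u)) c0

theorem pv_init_nodup : ∀ (l : List String) (d : PySem.Dict String Int), d.keys.Nodup →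
    (l.foldl pvInitStep d).keys.Nodup := by
  intro l
  induction l with
  | nil => intro d h; simpa using h
  | cons m l ih =>
    intro d h
    refine ih _ ?_
    unfold pvInitStep
    split_ifs <;> exact PySem.Dict.nodup_keys_insert _ _ _ (by first | exact PySem.Dict.nodup_keys_insert _ _ _ h | exact h)

theorem pv_init_contains : ∀ (l : List String) (d : PySem.Dict String Int) (m : String),
    (m ∈ l ∨ d.contains m = true) → (l.foldl pvInitStep d).contains m = true := by
  intro l
  induction l with
  | nil => intro d m h; simpa using h.resolve_left (by simp)
  | cons x l ih =>
    intro d m h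
    simp only [List.foldl_cons]
    refine ih _ _ ?_
    rcases h with h | h
    · rcases List.mem_cons.mp h with rfl | h
      · right; unfold pvInitStep; simp
      · left; exact h
    · right; unfold pvInitStep; split_ifs <;> simp [PySem.Dict.contains_insert, h]

theorem pv_init_zero : ∀ (l : List String) (d : PySem.Dict String Int),
    (∀ p ∈ d.items, p.2 = 0) → ∀ p ∈ (l.foldl pvInitStep d).items, p.2 = 0 := by
  intro l
  induction l with
  | nil => intro d h; simpa using h
  | cons x l ih =>
    intro d h
    simp only [List.foldl_cons]
    refine ih _ ?_
    intro p hp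
    unfold pvInitStep at hp
    rcases (PySem.Dict.mem_items_insert _ _ _ _).mp hp with rfl | ⟨hp', _⟩
    · rfl
    · split_ifs at hp'
      · rcases (PySem.Dict.mem_items_insert _ _ _ _).mp hp' with rfl | ⟨hp'', _⟩
        · rfl
        · exact h _ hp''
      · rcases (PySem.Dict.mem_items_insert _ _ _ _).mp hp' with rfl | ⟨hp'', _⟩
        · rfl
        · exact h _ hp''
      · exact h _ hp'

theorem pv_addEvt_items (evt : List (String × Int)) :
    ∀ (l : List String) (d : PySem.Dict String Int), d.keys.Nodup →
    (∀ m ∈ l, d.contains m = true) →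
    (pvAddEvt l evt d).items =
      d.items.map (fun p => (p.1, p.2 + (l.count p.1 : Int) * (PySem.Dict.ofList evt).getD p.1 0)) := by
  intro l
  induction l with
  | nil =>
    intro d _ _
    simp [pvAddEvt]
  | cons m l ih =>
    intro d hnd hc
    have hm : d.contains m = true := hc m (by simp)
    have hstep : pvAddEvt (m :: l) evt d
        = pvAddEvt l evt (d.insert m (d.getD m 0 + (PySem.Dict.ofList evt).getD m 0)) := by
      simp [pvAddEvt]
    rw [hstep, ih _ (PySem.Dict.nodup_keys_insert _ _ _ hnd)
        (by intro k hk
            simp [PySem.Dict.contains_insert, hc k (List.mem_cons_of_mem _ hk)]),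
      PySem.Dict.items_insert_of_contains _ _ hm, List.map_map]
    apply List.map_congr_left
    intro p hp
    by_cases hpm : p.1 = m
    · have hgd : d.getD m 0 = p.2 := by
        have : (m, p.2) ∈ d.items := by rw [← hpm]; exact hp
        exact PySem.Dict.getD_of_mem_items _ this hnd 0
      simp only [Function.comp_apply, hpm, beq_self_eq_true, if_pos, hgd]
      have hcount : ((m :: l).count m : Int) = (l.count m : Int) + 1 := by
        rw [List.count_cons_self]; push_cast; ring
      rw [← hpm] at hcount ⊢
      refine congrArg (Prod.mk p.1) ?_
      rw [hcount]; ring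
    · have : (p.1 == m) = false := by simp [hpm]
      simp only [Function.comp_apply, this, Bool.false_eq_true, if_false]
      have : (m :: l).count p.1 = l.count p.1 := by
        rw [List.count_cons_of_ne (fun h => hpm h.symm)]
      simp [this]

theorem pv_addEvt_keys (evt : List (String × Int)) (l : List String) (d : PySem.Dict String Int)
    (hnd : d.keys.Nodup) (hc : ∀ m ∈ l, d.contains m = true) :
    (pvAddEvt l evt d).keys = d.keys := by
  simp only [PySem.Dict.keys, pv_addEvt_items evt l d hnd hc, List.map_map]
  rfl

theorem pv_addAll_items (ml : List String) :
    ∀ (evts : List (List (String × Int))) (d : PySem.Dict String Int), d.keys.Nodup →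
    (∀ m ∈ ml, d.contains m = true) →
    (evts.foldl (fun d evt => pvAddEvt ml evt d) d).items =
      d.items.map (fun p => (p.1, p.2 + (ml.count p.1 : Int) * pvTot evts p.1)) := by
  intro evts
  induction evts with
  | nil =>
    intro d _ _
    simp [pvTot]
  | cons e evts ih =>
    intro d hnd hc
    have hk := pv_addEvt_keys e ml d hnd hc
    have hnd' : (pvAddEvt ml e d).keys.Nodup := by rw [hk]; exact hnd
    have hc' : ∀ m ∈ ml, (pvAddEvt ml e d).contains m = true := by
      intro m hm
      rw [PySem.Dict.contains_iff_mem_keys, hk, ← PySem.Dict.contains_iff_mem_keys]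
      exact hc m hm
    simp only [List.foldl_cons]
    rw [ih _ hnd' hc', pv_addEvt_items e ml d hnd hc, List.map_map]
    apply List.map_congr_left
    intro p _
    simp only [Function.comp_apply, pvTot, List.map_cons, List.sum_cons]
    refine congrArg (Prod.mk p.1) ?_
    ring

theorem pv_rel_keys (f : String × Int → Int) (db da : PySem.Dict String Int)
    (hrel : db.items = da.items.map (fun p => (p.1, f p))) : db.keys = da.keys := by
  simp only [PySem.Dict.keys, hrel, List.map_map]
  rfl

theorem pv_agg_step (a : String) (tot : String → Int) (pre : List String)
    (da db : PySem.Dict String Int) (hnd : da.keys.Nodup)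
    (hz : ∀ p ∈ da.items, p.2 = 0) (hpre : ∀ k ∈ pre, da.contains k = true)
    (hrel : db.items = da.items.map (fun p => (p.1, if p.1 ∈ pre then tot p.1 else 0))) :
    (da.insert a 0).keys.Nodup ∧ (∀ p ∈ (da.insert a 0).items, p.2 = 0) ∧
    (∀ k ∈ pre, (da.insert a 0).contains k = true) ∧
    (db.setdefault a 0).items =
      (da.insert a 0).items.map (fun p => (p.1, if p.1 ∈ pre then tot p.1 else 0)) := by
  have hkeys : db.keys = da.keys := pv_rel_keys _ _ _ hrel
  have hcb : db.contains a = da.contains a := by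
    rw [PySem.Dict.contains_eq_decide_mem_keys, PySem.Dict.contains_eq_decide_mem_keys, hkeys]
  refine ⟨PySem.Dict.nodup_keys_insert _ _ _ hnd, ?_, ?_, ?_⟩
  · intro p hp
    rcases (PySem.Dict.mem_items_insert _ _ _ _).mp hp with rfl | ⟨hp', _⟩
    · rfl
    · exact hz _ hp'
  · intro k hk
    simp [PySem.Dict.contains_insert, hpre k hk]
  · by_cases hcont : da.contains a = true
    · have hda : da.insert a 0 = da := by
        apply PySem.Dict.ext
        rw [PySem.Dict.items_insert_of_contains _ _ hcont]
        apply List.map_congr_left ?_ |>.trans (List.map_id _)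
        intro p hp
        by_cases hpa : (p.1 == a) = true
        · have h1 : p.1 = a := by simpa using hpa
          have h2 : p.2 = 0 := hz p hp
          simp only [hpa, if_pos, id_eq]
          rw [← h1, ← h2]
        · simp [hpa]
      rw [hda, PySem.Dict.setdefault_of_contains _ _ (by rw [hcb]; exact hcont), hrel]
    · have hcont' : da.contains a = false := by simpa using hcont
      have hanp : a ∉ pre := fun h => hcont (hpre a h)
      rw [PySem.Dict.setdefault_of_not_contains _ _ (by rw [hcb]; exact hcont'),
        PySem.Dict.items_insert_of_not_contains _ _ (by rw [hcb]; exact hcont'),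
        PySem.Dict.items_insert_of_not_contains _ _ hcont', List.map_append, hrel]
      simp [hanp]

theorem pv_met_step (m : String) (tot : String → Int) (pre : List String)
    (da db : PySem.Dict String Int) (hnd : da.keys.Nodup)
    (hz : ∀ p ∈ da.items, p.2 = 0) (hpre : ∀ k ∈ pre, da.contains k = true)
    (hrel : db.items = da.items.map (fun p => (p.1, if p.1 ∈ pre then tot p.1 else 0))) :
    (da.insert m 0).keys.Nodup ∧ (∀ p ∈ (da.insert m 0).items, p.2 = 0) ∧
    (∀ k ∈ pre ++ [m], (da.insert m 0).contains k = true) ∧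
    (db.insert m (tot m)).items =
      (da.insert m 0).items.map (fun p => (p.1, if p.1 ∈ pre ++ [m] then tot p.1 else 0)) := by
  have hkeys : db.keys = da.keys := pv_rel_keys _ _ _ hrel
  have hcb : db.contains m = da.contains m := by
    rw [PySem.Dict.contains_eq_decide_mem_keys, PySem.Dict.contains_eq_decide_mem_keys, hkeys]
  refine ⟨PySem.Dict.nodup_keys_insert _ _ _ hnd, ?_, ?_, ?_⟩
  · intro p hp
    rcases (PySem.Dict.mem_items_insert _ _ _ _).mp hp with rfl | ⟨hp', _⟩
    · rfl
    · exact hz _ hp'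
  · intro k hk
    rcases List.mem_append.mp hk with hk | hk
    · simp [PySem.Dict.contains_insert, hpre k hk]
    · simp [List.mem_singleton.mp hk]
  · by_cases hcont : da.contains m = true
    · rw [PySem.Dict.items_insert_of_contains _ _ (by rw [hcb]; exact hcont),
        PySem.Dict.items_insert_of_contains _ _ hcont, hrel, List.map_map, List.map_map]
      apply List.map_congr_left
      intro p _
      by_cases hpm : (p.1 == m) = true
      · have h1 : p.1 = m := by simpa using hpm
        simp [h1]
      · have h1 : ¬ p.1 = m := by simpa using hpm
        simp [h1]
    · have hcont' : da.contains m = false := by simpa using hcont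
      rw [PySem.Dict.items_insert_of_not_contains _ _ (by rw [hcb]; exact hcont'),
        PySem.Dict.items_insert_of_not_contains _ _ hcont', List.map_append, hrel]
      have hmk : ∀ p ∈ da.items, p.1 ≠ m := by
        intro p hp h
        apply hcont
        rw [PySem.Dict.contains_iff_mem_keys, ← h]
        simp only [PySem.Dict.keys]
        exact List.mem_map_of_mem hp
      refine congrArg₂ (· ++ ·) ?_ (by simp)
      apply List.map_congr_left
      intro p hp
      have := hmk p hp
      simp [this]

theorem pv_build_rel (matched : List (List (String × Int))) :
    ∀ (l pre : List String) (da db : PySem.Dict String Int), da.keys.Nodup →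
    (∀ p ∈ da.items, p.2 = 0) →
    (∀ k ∈ pre, da.contains k = true) →
    db.items = da.items.map (fun p => (p.1, if p.1 ∈ pre then pvTot matched p.1 else 0)) →
    (l.foldl (pvBuildStep matched) db).items =
      (l.foldl pvInitStep da).items.map
        (fun p => (p.1, if p.1 ∈ pre ++ l then pvTot matched p.1 else 0)) := by
  intro l
  induction l with
  | nil =>
    intro pre da db _ _ _ hrel
    simpa using hrel
  | cons m l ih =>
    intro pre da db hnd hz hpre hrel
    simp only [List.foldl_cons]
    have hstep :
        (pvInitStep da m).keys.Nodup ∧ (∀ p ∈ (pvInitStep da m).items, p.2 = 0) ∧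
        (∀ k ∈ pre ++ [m], (pvInitStep da m).contains k = true) ∧
        (pvBuildStep matched db m).items =
          (pvInitStep da m).items.map
            (fun p => (p.1, if p.1 ∈ pre ++ [m] then pvTot matched p.1 else 0)) := by
      unfold pvInitStep pvBuildStep
      split_ifs with h1 h2
      · obtain ⟨a1, a2, a3, a4⟩ :=
          pv_agg_step "RDCAS" (pvTot matched) pre da db hnd hz hpre hrel
        exact pv_met_step m (pvTot matched) pre _ _ a1 a2 a3 a4
      · obtain ⟨a1, a2, a3, a4⟩ :=
          pv_agg_step "WRCAS" (pvTot matched) pre da db hnd hz hpre hrel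
        exact pv_met_step m (pvTot matched) pre _ _ a1 a2 a3 a4
      · exact pv_met_step m (pvTot matched) pre da db hnd hz hpre hrel
    obtain ⟨h1, h2, h3, h4⟩ := hstep
    have := ih (pre ++ [m]) (pvInitStep da m) (pvBuildStep matched db m) h1 h2 h3 h4
    rw [this]
    simp

theorem pv_dicts_eq (matched : List (List (String × Int))) (ml : List String)
    (hml : ml.Nodup ∨ matched = []) :
    (matched.foldl (fun d evt => pvAddEvt ml evt d) (ml.foldl pvInitStep PySem.Dict.empty))
    = ml.foldl (pvBuildStep matched) PySem.Dict.empty := by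
  apply PySem.Dict.ext
  have hnd0 : (ml.foldl pvInitStep (PySem.Dict.empty : PySem.Dict String Int)).keys.Nodup :=
    pv_init_nodup ml _ PySem.Dict.nodup_keys_empty
  have hc0 : ∀ m ∈ ml, (ml.foldl pvInitStep (PySem.Dict.empty : PySem.Dict String Int)).contains m = true :=
    fun m hm => pv_init_contains ml _ m (Or.inl hm)
  have hz0 := pv_init_zero ml PySem.Dict.empty (by simp [PySem.Dict.empty])
  rw [pv_addAll_items ml _ _ hnd0 hc0,
    pv_build_rel matched ml [] PySem.Dict.empty PySem.Dict.empty PySem.Dict.nodup_keys_empty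
      (by simp [PySem.Dict.empty]) (by simp) (by simp [PySem.Dict.empty])]
  apply List.map_congr_left
  intro p hp
  have hz := hz0 p hp
  simp only [List.nil_append]
  rcases hml with hml | rfl
  · by_cases hm : p.1 ∈ ml
    · have hcnt : ml.count p.1 = 1 := List.count_eq_one_of_mem hml hm
      rw [if_pos hm, hz, hcnt, zero_add]
      simp
    · have hcnt : ml.count p.1 = 0 := List.count_eq_zero.mpr hm
      rw [if_neg hm, hz, hcnt, zero_add]
      simp
  · have ht : pvTot [] p.1 = 0 := by simp [pvTot]
    rw [hz, ht, mul_zero, zero_add]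
    split <;> rfl

-- ===== VERDICT (by name: the statement is the Claim_ definition above) =====
theorem get_syscall_sum_spec : Claim_equal_get_syscall_sum := by
  intro usages eid retval ml _ hpre
  unfold Spec_get_syscall_sum get_syscall_sum get_syscall_sum_alt
  have hd : ml.Nodup ∨ ((usages.flatMap (fun u => u)).filter (pvMatch eid retval)) = [] := by
    rcases hpre.1 with h | h
    · exact Or.inl h
    · refine Or.inr (List.filter_eq_nil_iff.mpr ?_)
      intro e he
      obtain ⟨u, hu, heu⟩ := List.mem_flatMap.mp he
      simp [h u hu e heu]
  rw [pv_scan_eq, pv_dicts_eq _ _ hd]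
  simp
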